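-- pv_equiv track=rewrite | github.com/ecreall/deform_treepy | deform_treepy/utilities/tree_utility.py | normalize_keywords_out
-- ===== SOURCE A (Python) =====
-- def normalize_keywords_out(keywords, mapping):
--     new_keywords = []
--     mapping_nodes = {}
--     for node_mapping in mapping:
--         for alias in node_mapping.get('aliases'):
--             mapping_nodes[alias] = node_mapping
--
--     for keyword in list(keywords):
--         new_keyword = [keyword]
--         if keyword.lower() in mapping_nodes:
--             node_mapping = mapping_nodes[keyword.lower()]
--             new_keyword = [node_mapping.get('node_id').split('/')[-1]]
--
--         new_keywords.extend(new_keyword)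
--
--     return new_keywords
-- ===== SOURCE B (Python) =====
-- def normalize_keywords_out(keywords, mapping):
--     new_keywords = []
--     for keyword in keywords:
--         kl = keyword.lower()
--         node = next((nm for nm in reversed(mapping)
--                      if any(kl == a for a in nm.get('aliases'))), None)
--         if node is None:
--             new_keywords.append(keyword)
--         else:
--             new_keywords.append(node.get('node_id').split('/')[-1])
--     return new_keywords
-- ===== Notes on version B (the rewrite author's own statement) =====
-- stated objective: alternative
-- what changed: B drops A's prebuilt alias->node dict entirely: for each keyword it scans the mapping list in reverse and takes the first node whose 'aliases' characters contain the lowered keyword (= A's last-overwrite dict semantics).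
import Mathlib
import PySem

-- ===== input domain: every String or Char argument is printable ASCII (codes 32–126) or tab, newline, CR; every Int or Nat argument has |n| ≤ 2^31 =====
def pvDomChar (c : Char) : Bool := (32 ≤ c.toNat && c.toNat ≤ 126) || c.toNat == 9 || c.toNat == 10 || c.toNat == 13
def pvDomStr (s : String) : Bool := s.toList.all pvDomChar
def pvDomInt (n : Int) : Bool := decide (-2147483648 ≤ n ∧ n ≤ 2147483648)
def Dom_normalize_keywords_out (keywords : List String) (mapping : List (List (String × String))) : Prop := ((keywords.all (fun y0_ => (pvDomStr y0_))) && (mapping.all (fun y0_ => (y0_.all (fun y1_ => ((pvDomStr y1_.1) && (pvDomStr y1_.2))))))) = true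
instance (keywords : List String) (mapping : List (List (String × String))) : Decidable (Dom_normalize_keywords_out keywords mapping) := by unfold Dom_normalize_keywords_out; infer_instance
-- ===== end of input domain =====

-- B replaces A's prebuilt alias->node dict with a per-keyword reverse scan of the mapping list
-- (same values; an alternative decomposition, not claimed faster).


-- node_mapping.get('aliases'): Python iterates the STRING, i.e. its characters
def pvAliases (nm : List (String × String)) : List Char :=
  (((PySem.Dict.ofList nm).get? "aliases").getD "").toList

-- node_mapping.get('node_id').split('/')[-1]  (split('/') is never empty, so [-1] never raises)
def pvSplitLast (s : String) : String :=
  (PySem.List.pyGet? ((PySem.Str.split? s "/").getD []) (-1)).getD ""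

-- ===== PORT A =====
def normalize_keywords_out (keywords : List String) (mapping : List (List (String × String))) : List String :=
  -- mapping_nodes[alias] = node_mapping, for every character alias of node_mapping.get('aliases')
  let mapping_nodes : PySem.Dict String (List (String × String)) :=
    mapping.foldl (fun d node_mapping =>
      (pvAliases node_mapping).foldl
        (fun d a => d.insert (String.ofList [a]) node_mapping) d)
      PySem.Dict.empty
  keywords.foldl (fun new_keywords keyword =>
    let new_keyword : List String :=
      match mapping_nodes.get? (PySem.Str.lower keyword) with   -- 'if keyword.lower() in mapping_nodes'
      | some node_mapping =>
          [pvSplitLast (((PySem.Dict.ofList node_mapping).get? "node_id").getD "")]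
      | none => [keyword]
    new_keywords ++ new_keyword) []

-- ===== PORT B =====
-- any(kl == a for a in nm.get('aliases'))
def pvMatch (kl : String) (nm : List (String × String)) : Bool :=
  (pvAliases nm).any (fun a => kl == String.ofList [a])

def normalize_keywords_out_alt (keywords : List String) (mapping : List (List (String × String))) : List String :=
  keywords.map (fun keyword =>
    let kl := PySem.Str.lower keyword
    match mapping.reverse.find? (fun nm => pvMatch kl nm) with
    | some nm => pvSplitLast (((PySem.Dict.ofList nm).get? "node_id").getD "")
    | none => keyword)

-- ===== PRECONDITION & SPEC =====
-- Exactly where the Python A returns normally: every node_mapping has an 'aliases' key (A raises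
-- TypeError iterating None otherwise), and for every keyword that matches, the LAST matching
-- node_mapping (the one dict overwriting keeps) has a 'node_id' key (else A raises AttributeError).
def Pre_normalize_keywords_out (keywords : List String) (mapping : List (List (String × String))) : Prop :=
  (∀ nm ∈ mapping, ((PySem.Dict.ofList nm).contains "aliases") = true) ∧
  (∀ k ∈ keywords, ∀ nm, (mapping.filter (fun nm => pvMatch (PySem.Str.lower k) nm)).getLast? = some nm →
    ((PySem.Dict.ofList nm).contains "node_id") = true)

instance (keywords : List String) (mapping : List (List (String × String))) : Decidable (Pre_normalize_keywords_out keywords mapping) := by unfold Pre_normalize_keywords_out; infer_instance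

def pvWitness_normalize_keywords_out : List String × (List (List (String × String))) :=
  (["A", "b "], [[("aliases", "ab"), ("node_id", "x/y/z")]])

def Spec_normalize_keywords_out (keywords : List String) (mapping : List (List (String × String))) (out : List String) : Prop := out = normalize_keywords_out_alt keywords mapping
instance (keywords : List String) (mapping : List (List (String × String))) (out : List String) : Decidable (Spec_normalize_keywords_out keywords mapping out) := by unfold Spec_normalize_keywords_out; infer_instance

-- ===== CLAIM (what is proved, stated in full; the proofs are below) =====
def Claim_equal_normalize_keywords_out : Prop := ∀ (keywords : List String) (mapping : List (List (String × String))), Dom_normalize_keywords_out keywords mapping → Pre_normalize_keywords_out keywords mapping → Spec_normalize_keywords_out keywords mapping (normalize_keywords_out keywords mapping)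

-- ===== LEMMAS AND PROOFS =====

-- what A appends for one keyword / what B produces for one keyword
def pvNewA (mapping : List (List (String × String))) (k : String) : List String :=
  match (mapping.foldl (fun d nm => (pvAliases nm).foldl (fun d a => d.insert (String.ofList [a]) nm) d)
      PySem.Dict.empty).get? (PySem.Str.lower k) with
  | some nm => [pvSplitLast (((PySem.Dict.ofList nm).get? "node_id").getD "")]
  | none => [k]

def pvNewB (mapping : List (List (String × String))) (k : String) : String :=
  match mapping.reverse.find? (fun nm => pvMatch (PySem.Str.lower k) nm) with
  | some nm => pvSplitLast (((PySem.Dict.ofList nm).get? "node_id").getD "")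
  | none => k

-- the inner loop over one node's alias characters: every insert stores the same node
theorem pvInner (nm : List (String × String)) (key : String) :
    ∀ (cs : List Char) (d : PySem.Dict String (List (String × String))),
      (cs.foldl (fun d a => d.insert (String.ofList [a]) nm) d).get? key
        = if cs.any (fun a => key == String.ofList [a]) then some nm else d.get? key := by
  intro cs
  induction cs with
  | nil => intro d; simp
  | cons c cs ih =>
      intro d
      simp only [List.foldl_cons, List.any_cons]
      rw [ih]
      by_cases hc : key = String.ofList [c]
      · subst hc
        simp [PySem.Dict.get?_insert_self]
      · have hb : (key == String.ofList [c]) = false := by simpa using hc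
        simp [hb, PySem.Dict.get?_insert, hc]

-- A's alias dict looks up to the LAST matching node = first match of the reversed mapping
theorem pvOuter (key : String) :
    ∀ (ms : List (List (String × String))) (d : PySem.Dict String (List (String × String))),
      ((ms.foldl (fun d nm => (pvAliases nm).foldl (fun d a => d.insert (String.ofList [a]) nm) d) d).get? key)
        = match ms.reverse.find? (fun nm => pvMatch key nm) with
          | some nm => some nm
          | none => d.get? key := by
  intro ms
  induction ms with
  | nil => intro d; simp
  | cons nm ms ih =>
      intro d
      simp only [List.foldl_cons, List.reverse_cons]
      rw [ih, List.find?_append]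
      rcases hf : ms.reverse.find? (fun nm => pvMatch key nm) with _ | nm'
      · simp only [Option.none_or]
        rw [pvInner nm key (pvAliases nm) d]
        rcases hm : pvMatch key nm with _ | _
        · have hm' : ((pvAliases nm).any fun a => key == String.ofList [a]) = false := hm
          rw [hm']
          simp [List.find?, hm]
        · have hm' : ((pvAliases nm).any fun a => key == String.ofList [a]) = true := hm
          rw [hm']
          simp [List.find?, hm]
      · simp

-- per keyword, A's appended singleton is exactly B's value
theorem pvPoint (mapping : List (List (String × String))) (k : String) :
    pvNewA mapping k = [pvNewB mapping k] := by
  unfold pvNewA pvNewB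
  rw [pvOuter (PySem.Str.lower k) mapping PySem.Dict.empty]
  rcases hf : mapping.reverse.find? (fun nm => pvMatch (PySem.Str.lower k) nm) with _ | nm
  · simp
  · simp

-- A's accumulator fold appends exactly one element per keyword
theorem pvFoldAppend (f : String → List String) (g : String → String) (h : ∀ k, f k = [g k]) :
    ∀ (ks : List String) (acc : List String),
      ks.foldl (fun a k => a ++ f k) acc = acc ++ ks.map g := by
  intro ks
  induction ks with
  | nil => intro acc; simp
  | cons k ks ih =>
      intro acc
      simp [List.foldl_cons, ih, h k]

-- ===== VERDICT (by name: the statement is the Claim_ definition above) =====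
theorem normalize_keywords_out_spec : Claim_equal_normalize_keywords_out := by
  intro keywords mapping _ _
  show normalize_keywords_out keywords mapping = normalize_keywords_out_alt keywords mapping
  have : normalize_keywords_out keywords mapping
      = keywords.foldl (fun a k => a ++ pvNewA mapping k) [] := rfl
  rw [this, pvFoldAppend (pvNewA mapping) (pvNewB mapping) (pvPoint mapping) keywords []]
  rfl
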